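-- pv_equiv track=rewrite | github.com/lessneek/paraproxio | paraproxio.py | get_bytes_ranges_by_part_size
-- ===== SOURCE A (Python) =====
-- from typing import Tuple, Callable, Optional, List, Set, Dict, Any
--
-- def get_bytes_ranges_by_part_size(length: int, part_size: int) -> List[Tuple[int, int]]:
--     bytes_ranges = []
--     for offset in range(0, length, part_size):
--         left = length - offset
--         if left < part_size:
--             part_size = left
--         bytes_ranges.append((offset, offset + part_size - 1))
--     return bytes_ranges
-- ===== SOURCE B (Python) =====
-- def get_bytes_ranges_by_part_size(length: int, part_size: int):
--     bounds = list(range(0, length, part_size)) + [length]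
--     return [(s, e - 1) for s, e in zip(bounds, bounds[1:])]
-- ===== Notes on version B (the rewrite author's own statement) =====
-- stated objective: simpler
-- what changed: Instead of a loop that mutates part_size and appends ranges, B builds the boundary offsets once (range(0, length, part_size) plus the final length) and pairs consecutive boundaries, so the partial last chunk needs no special case.
-- outside the precondition, e.g. on get_bytes_ranges_by_part_size(10, 0): A raises ValueError, B raises ValueError; on get_bytes_ranges_by_part_size(-5, -2): A returns [(0, -6), (-2, -8), (-4, -10)], B returns [(0, -3), (-2, -5), (-4, -6)]
import Mathlib
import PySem

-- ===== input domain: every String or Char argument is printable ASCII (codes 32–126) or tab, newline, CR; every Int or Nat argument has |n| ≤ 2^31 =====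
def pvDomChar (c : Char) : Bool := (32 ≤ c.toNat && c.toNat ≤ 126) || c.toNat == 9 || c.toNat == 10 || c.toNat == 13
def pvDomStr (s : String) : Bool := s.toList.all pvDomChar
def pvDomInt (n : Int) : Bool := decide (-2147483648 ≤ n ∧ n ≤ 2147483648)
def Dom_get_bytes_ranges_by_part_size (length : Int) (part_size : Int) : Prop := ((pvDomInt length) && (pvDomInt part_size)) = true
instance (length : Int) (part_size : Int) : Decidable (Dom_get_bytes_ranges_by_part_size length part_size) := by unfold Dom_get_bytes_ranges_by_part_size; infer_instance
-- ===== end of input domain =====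

-- B replaces A's mutating loop by pairing consecutive boundary offsets (simpler decomposition, same cost).

-- ===== PORT A =====
def get_bytes_ranges_by_part_size (length : Int) (part_size : Int) : List (Int × Int) :=
  ((PySem.List.pyRange 0 length part_size).foldl
    (fun (st : List (Int × Int) × Int) offset =>
      let left := length - offset
      let ps := if left < st.2 then left else st.2
      (st.1 ++ [(offset, offset + ps - 1)], ps))
    ([], part_size)).1

-- ===== PORT B =====
def get_bytes_ranges_by_part_size_alt (length : Int) (part_size : Int) : List (Int × Int) :=
  let bounds := PySem.List.pyRange 0 length part_size ++ [length]
  (bounds.zip (PySem.List.slice bounds (some 1) none)).map (fun se => (se.1, se.2 - 1))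

-- ===== PRECONDITION & SPEC =====
-- Pre_ excludes part_size = 0, where Python's range raises ValueError (both A and B raise),
-- and the malformed quadrant part_size < 0 ∧ length < 0, where A's shrinking-part_size loop
-- returns accidental negative-width ranges; B does the natural boundary pairing there.
def Pre_get_bytes_ranges_by_part_size (length : Int) (part_size : Int) : Prop :=
  part_size ≠ 0 ∧ (0 < part_size ∨ 0 ≤ length)
instance (length : Int) (part_size : Int) : Decidable (Pre_get_bytes_ranges_by_part_size length part_size) := by
  unfold Pre_get_bytes_ranges_by_part_size; infer_instance

def pvWitness_get_bytes_ranges_by_part_size : Int × Int := (10, 3)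

def Spec_get_bytes_ranges_by_part_size (length : Int) (part_size : Int) (out : List (Int × Int)) : Prop :=
  out = get_bytes_ranges_by_part_size_alt length part_size
instance (length : Int) (part_size : Int) (out : List (Int × Int)) : Decidable (Spec_get_bytes_ranges_by_part_size length part_size out) := by
  unfold Spec_get_bytes_ranges_by_part_size; infer_instance

-- ===== CLAIM (what is proved, stated in full; the proofs are below) =====
def Claim_equal_get_bytes_ranges_by_part_size : Prop := ∀ (length : Int) (part_size : Int), Dom_get_bytes_ranges_by_part_size length part_size → Pre_get_bytes_ranges_by_part_size length part_size → Spec_get_bytes_ranges_by_part_size length part_size (get_bytes_ranges_by_part_size length part_size)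

-- ===== LEMMAS AND PROOFS =====

-- A's loop, as a structural recursion producing the emitted list directly.
def pvALoop (length : Int) : Int → List Int → List (Int × Int)
  | _, [] => []
  | ps, o :: rest =>
      let ps' := if length - o < ps then length - o else ps
      (o, o + ps' - 1) :: pvALoop length ps' rest

lemma pvFoldA (length : Int) (l : List Int) (acc : List (Int × Int)) (ps : Int) :
    ((l.foldl
      (fun (st : List (Int × Int) × Int) offset =>
        let left := length - offset
        let ps := if left < st.2 then left else st.2
        (st.1 ++ [(offset, offset + ps - 1)], ps))
      (acc, ps))).1 = acc ++ pvALoop length ps l := by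
  induction l generalizing acc ps with
  | nil => simp [pvALoop]
  | cons o rest ih => simp [pvALoop, ih]

-- B's pairing of consecutive boundaries.
def pvZP (l : List Int) : List (Int × Int) :=
  (l.zip (l.drop 1)).map (fun se => (se.1, se.2 - 1))

lemma pvAlt_eq (length part_size : Int) :
    get_bytes_ranges_by_part_size_alt length part_size
      = pvZP (PySem.List.pyRange 0 length part_size ++ [length]) := by
  have h := PySem.List.slice_from (PySem.List.pyRange 0 length part_size ++ [length])
    (show (0:Int) ≤ 1 by norm_num)
  simp [get_bytes_ranges_by_part_size_alt, pvZP, h]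

lemma pvRange_nil_of_ge {a b ps : Int} (hps : 0 < ps) (h : b ≤ a) :
    PySem.List.pyRange a b ps = [] := by
  rw [PySem.List.pyRange_of_pos a b hps]
  simp [show ¬ a < b by omega]

lemma pvRange_nil_neg {a b ps : Int} (hps : ps < 0) (h : a ≤ b) :
    PySem.List.pyRange a b ps = [] := by
  simp only [PySem.List.pyRange]
  rw [if_neg (by omega)]
  simp [show ¬ 0 < ps by omega, show ¬ b < a by omega]

lemma pvRange_cons {a b ps : Int} (hps : 0 < ps) (h : a < b) :
    PySem.List.pyRange a b ps = a :: PySem.List.pyRange (a + ps) b ps := by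
  rw [PySem.List.pyRange_of_pos a b hps, PySem.List.pyRange_of_pos (a + ps) b hps, if_pos h]
  have key : ∀ d : Int, 0 < d → (d + ps - 1) / ps = (d - 1) / ps + 1 := by
    intro d hd
    have e : d + ps - 1 = d - 1 + 1 * ps := by ring
    rw [e, Int.add_mul_ediv_right _ _ (by omega : ps ≠ 0)]
  by_cases h2 : a + ps < b
  · rw [if_pos h2, key (b - a) (by omega), key (b - (a + ps)) (by omega)]
    have e2 : (b - a - 1) / ps = (b - (a + ps) - 1) / ps + 1 := by
      have e : b - a - 1 = b - (a + ps) - 1 + 1 * ps := by ring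
      rw [e, Int.add_mul_ediv_right _ _ (by omega : ps ≠ 0)]
    have hnn2 : 0 ≤ (b - (a + ps) - 1) / ps := Int.ediv_nonneg (by omega) (by omega)
    rw [e2]
    have ht : ((b - (a + ps) - 1) / ps + 1 + 1).toNat = ((b - (a + ps) - 1) / ps + 1).toNat + 1 := by
      omega
    rw [ht, List.range_succ_eq_map]
    simp only [List.map_cons, List.map_map, Nat.cast_zero, mul_zero, add_zero]
    congr 1
    apply List.map_congr_left
    intro k _
    simp only [Function.comp_apply, Nat.succ_eq_add_one]
    push_cast
    ring
  · rw [if_neg h2, key (b - a) (by omega),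
      Int.ediv_eq_zero_of_lt (by omega : (0:Int) ≤ b - a - 1) (by omega : b - a - 1 < ps)]
    simp

-- the core equivalence: A's loop over the offsets equals B's pairing of boundaries
lemma pvMain (length ps : Int) (hps : 0 < ps) :
    ∀ o : Int, pvALoop length ps (PySem.List.pyRange o length ps)
      = pvZP (PySem.List.pyRange o length ps ++ [length]) := by
  intro o
  by_cases h : length ≤ o
  · rw [pvRange_nil_of_ge hps h]; simp [pvALoop, pvZP]
  · have h' : o < length := by omega
    have hm : (length - (o + ps)).toNat < (length - o).toNat := by omega
    rw [pvRange_cons hps h']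
    by_cases h2 : o + ps < length
    · have ih := pvMain length ps hps (o + ps)
      rw [pvRange_cons hps h2] at ih ⊢
      simp only [pvALoop, pvZP, List.cons_append, List.drop_succ_cons, List.zip_cons_cons,
        List.map_cons, List.drop_zero] at ih ⊢
      rw [if_neg (by omega)]
      rw [ih]
    · rw [pvRange_nil_of_ge hps (by omega : length ≤ o + ps)]
      simp only [pvALoop, pvZP, List.nil_append, List.cons_append, List.drop_succ_cons,
        List.zip_cons_cons, List.map_cons, List.drop_zero, List.zip_nil_right, List.map_nil,
        List.cons.injEq, Prod.mk.injEq]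
      refine ⟨⟨by trivial, ?_⟩, by trivial⟩
      split_ifs <;> omega
termination_by o => (length - o).toNat
decreasing_by exact hm

-- ===== VERDICT (by name: the statement is the Claim_ definition above) =====
theorem get_bytes_ranges_by_part_size_spec : Claim_equal_get_bytes_ranges_by_part_size := by
  intro length part_size _ hpre
  unfold Spec_get_bytes_ranges_by_part_size
  rw [pvAlt_eq]
  unfold get_bytes_ranges_by_part_size
  rcases hpre with ⟨hne, hcase⟩
  rcases lt_trichotomy part_size 0 with hneg | hz | hpos
  · have hlen : 0 ≤ length := by omega
    rw [pvRange_nil_neg hneg hlen]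
    simp [pvZP]
  · exact absurd hz hne
  · rw [pvFoldA]
    simpa using pvMain length part_size hpos 0
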